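-- pv_equiv track=rewrite | github.com/jkoszucki/jkt_repo | scripts/figures/chapter2/lib/ktypes_plots.py | _extract_monos_from_chain
-- ===== SOURCE A (Python) =====
-- from typing import Dict, List, Optional, Tuple
--
-- def _extract_monos_from_chain(text: str) -> List[str]:
--     monos: List[str] = []
--     for segment in text.split(";"):
--         remaining = segment.strip()
--         while "(" in remaining:
--             prefix, remaining = remaining.split("(", 1)
--             prefix = prefix.strip()
--             prefix = prefix.strip(";,:")
--             prefix = prefix.strip()
--             if prefix:
--                 monos.append(prefix)
--             if ")" in remaining:
--                 remaining = remaining.split(")", 1)[1].strip()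
--             else:
--                 remaining = ""
--         if remaining:
--             tail = remaining.strip()
--             tail = tail.strip(";,:")
--             tail = tail.strip()
--             if tail:
--                 monos.append(tail)
--     return monos
-- ===== SOURCE B (Python) =====
-- from typing import List
--
-- def _clean(chars: List[str]) -> str:
--     return "".join(chars).strip().strip(";,:").strip()
--
-- def _extract_monos_from_chain(text: str) -> List[str]:
--     monos: List[str] = []
--     for segment in text.split(";"):
--         buf: List[str] = []
--         in_paren = False
--         for ch in segment:
--             if in_paren:
--                 if ch == ")":
--                     in_paren = False
--             elif ch == "(":
--                 token = _clean(buf)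
--                 if token:
--                     monos.append(token)
--                 buf = []
--                 in_paren = True
--             else:
--                 buf.append(ch)
--         if not in_paren:
--             token = _clean(buf)
--             if token:
--                 monos.append(token)
--     return monos
-- ===== Notes on version B (the rewrite author's own statement) =====
-- stated objective: alternative
-- what changed: A repeatedly re-splits each segment at the first open and close parenthesis inside a while loop over shrinking strings; B makes a single left-to-right character scan per segment with an in-paren flag and a token buffer, flushing the cleaned buffer at each group start and at segment end.
import Mathlib
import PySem

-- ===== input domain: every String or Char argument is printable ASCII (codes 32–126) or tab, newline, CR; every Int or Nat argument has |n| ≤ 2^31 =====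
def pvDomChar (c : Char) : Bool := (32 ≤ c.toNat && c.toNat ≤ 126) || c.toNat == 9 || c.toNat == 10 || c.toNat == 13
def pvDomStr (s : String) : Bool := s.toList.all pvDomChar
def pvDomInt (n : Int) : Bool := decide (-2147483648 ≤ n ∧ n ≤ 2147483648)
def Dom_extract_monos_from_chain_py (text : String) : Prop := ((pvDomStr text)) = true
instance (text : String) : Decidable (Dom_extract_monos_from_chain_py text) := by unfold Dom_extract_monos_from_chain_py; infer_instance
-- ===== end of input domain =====

-- B replaces A's repeated first-'('/first-')' string splitting inside a while loop by a single
-- left-to-right character scan per segment with an in-paren flag and a token buffer (objective: alternative).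

-- ===== PORT A =====
-- helper lemmas the port needs for termination (cited by name in decreasing_by)
theorem pv_length_strip_le (cs : List Char) : (PySem.Chars.strip cs).length ≤ cs.length := by
  simp only [PySem.Chars.strip, PySem.Chars.rstrip, PySem.Chars.lstrip]
  have h1 := List.length_dropWhile_le PySem.Chars.isspace cs
  have h2 := List.length_dropWhile_le PySem.Chars.isspace (List.dropWhile PySem.Chars.isspace cs).reverse
  simp only [List.length_reverse] at *
  omega

theorem pv_length_tail_dropWhile_lt {c : Char} {l : List Char} (h : c ∈ l) :
    ((l.dropWhile (· ≠ c)).tail).length < l.length := by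
  have hne : l.dropWhile (· ≠ c) ≠ [] := by
    intro hnil
    rw [List.dropWhile_eq_nil_iff] at hnil
    have := hnil c h
    simp at this
  have h1 := List.length_dropWhile_le (· ≠ c) l
  have h2 : (l.dropWhile (· ≠ c)).length ≠ 0 := by
    simpa [List.length_eq_zero_iff] using hne
  simp only [List.length_tail]
  omega

-- the three-step cleaning both programs apply to every candidate token: strip, strip(";,:"), strip
-- (identical code in A and B: `.strip().strip(";,:").strip()`; shared here)
def pvCleanTok (cs : List Char) : List Char :=
  PySem.Chars.strip (PySem.Chars.stripChars (PySem.Chars.strip cs) [';', ',', ':'])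

-- the `while "(" in remaining` loop of A, plus the trailing `if remaining:` tail handling
def pvALoop (remaining : List Char) (monos : List String) : List String :=
  if h : '(' ∈ remaining then
    -- prefix, remaining = remaining.split("(", 1)
    let pre := remaining.takeWhile (· ≠ '(')
    let rest := (remaining.dropWhile (· ≠ '(')).tail
    let p := pvCleanTok pre
    let monos' := if p ≠ [] then monos ++ [String.ofList p] else monos
    if ')' ∈ rest then
      pvALoop (PySem.Chars.strip ((rest.dropWhile (· ≠ ')')).tail)) monos'
    else
      -- remaining = "", so the loop exits and the tail test fails
      monos'
  else
    if remaining ≠ [] then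
      let t := pvCleanTok remaining
      if t ≠ [] then monos ++ [String.ofList t] else monos
    else monos
termination_by remaining.length
decreasing_by
  have h1 := pv_length_tail_dropWhile_lt h
  by_cases h2 : ')' ∈ (remaining.dropWhile (· ≠ '(')).tail
  · have h3 := pv_length_tail_dropWhile_lt h2
    have h4 := pv_length_strip_le (((remaining.dropWhile (· ≠ '(')).tail.dropWhile (· ≠ ')')).tail)
    omega
  · have h5 := List.length_dropWhile_le (· ≠ ')') (remaining.dropWhile (· ≠ '(')).tail
    have h6 : (((remaining.dropWhile (· ≠ '(')).tail.dropWhile (· ≠ ')')).tail).length = ((remaining.dropWhile (· ≠ '(')).tail.dropWhile (· ≠ ')')).length - 1 := List.length_tail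
    have h4 := pv_length_strip_le (((remaining.dropWhile (· ≠ '(')).tail.dropWhile (· ≠ ')')).tail)
    omega

def extract_monos_from_chain_py (text : String) : List String :=
  (PySem.Chars.splitOn text.toList [';']).foldl
    (fun monos seg => pvALoop (PySem.Chars.strip seg) monos) []

-- ===== PORT B =====
-- one character of B's scan; state = (buf, in_paren, monos)
def pvBStep (st : List Char × Bool × List String) (c : Char) : List Char × Bool × List String :=
  if st.2.1 then
    if c = ')' then (st.1, false, st.2.2) else st
  else if c = '(' then
    let t := pvCleanTok st.1
    ([], true, if t ≠ [] then st.2.2 ++ [String.ofList t] else st.2.2)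
  else
    (st.1 ++ [c], false, st.2.2)

-- after the scan: flush the buffer unless we ended inside an unmatched '('
def pvBFinish (st : List Char × Bool × List String) : List String :=
  if st.2.1 then st.2.2
  else
    let t := pvCleanTok st.1
    if t ≠ [] then st.2.2 ++ [String.ofList t] else st.2.2

def extract_monos_from_chain_py_alt (text : String) : List String :=
  (PySem.Chars.splitOn text.toList [';']).foldl
    (fun monos seg => pvBFinish (seg.foldl pvBStep ([], false, monos))) []

-- ===== PRECONDITION & SPEC =====
def Spec_extract_monos_from_chain_py (text : String) (out : List String) : Prop := out = extract_monos_from_chain_py_alt text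
instance (text : String) (out : List String) : Decidable (Spec_extract_monos_from_chain_py text out) := by unfold Spec_extract_monos_from_chain_py; infer_instance

-- ===== CLAIM (what is proved, stated in full; the proofs are below) =====
def Claim_equal_extract_monos_from_chain_py : Prop := ∀ (text : String), Dom_extract_monos_from_chain_py text → Spec_extract_monos_from_chain_py text (extract_monos_from_chain_py text)

-- ===== LEMMAS AND PROOFS =====

-- dropWhile is idempotent
theorem pv_dropWhile_idem (p : Char → Bool) (l : List Char) :
    (l.dropWhile p).dropWhile p = l.dropWhile p := by
  induction l with
  | nil => rfl
  | cons a t ih =>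
    by_cases hp : p a
    · simp [List.dropWhile_cons, hp, ih]
    · simp [List.dropWhile_cons, hp]

-- dropWhile runs through an append up to the first stopping element
theorem pv_dropWhile_append_stop {p : Char → Bool} {a : Char} (ha : p a = false)
    (u w : List Char) : (u ++ a :: w).dropWhile p = u.dropWhile p ++ a :: w := by
  rw [List.dropWhile_append]
  split_ifs with h
  · rw [List.isEmpty_iff.mp h]
    simp [List.dropWhile_cons, ha]
  · rfl

theorem pv_lstrip_append {a : Char} (ha : PySem.Chars.isspace a = false) (x r : List Char) :
    PySem.Chars.lstrip (x ++ a :: r) = PySem.Chars.lstrip x ++ a :: r := by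
  simp only [PySem.Chars.lstrip]
  exact pv_dropWhile_append_stop ha x r

theorem pv_rstrip_append {a : Char} (ha : PySem.Chars.isspace a = false) (x r : List Char) :
    PySem.Chars.rstrip (x ++ a :: r) = x ++ a :: PySem.Chars.rstrip r := by
  simp only [PySem.Chars.rstrip]
  rw [show (x ++ a :: r).reverse = r.reverse ++ a :: x.reverse by simp]
  rw [pv_dropWhile_append_stop ha]
  simp

theorem pv_lstrip_idem (l : List Char) :
    PySem.Chars.lstrip (PySem.Chars.lstrip l) = PySem.Chars.lstrip l := by
  simp [PySem.Chars.lstrip, pv_dropWhile_idem]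

theorem pv_rstrip_idem (l : List Char) :
    PySem.Chars.rstrip (PySem.Chars.rstrip l) = PySem.Chars.rstrip l := by
  simp [PySem.Chars.rstrip, pv_dropWhile_idem]

-- rstrip keeps the head block intact as long as something non-space remains to its right
theorem pv_rstrip_cons_of_exists {t : List Char} (h : ∃ c ∈ t, PySem.Chars.isspace c = false)
    (a : Char) : PySem.Chars.rstrip (a :: t) = a :: PySem.Chars.rstrip t := by
  obtain ⟨c, hct, hcs⟩ := h
  have htr : (t.reverse.dropWhile PySem.Chars.isspace).isEmpty = false := by
    rw [Bool.eq_false_iff]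
    intro hx
    have hnil := List.isEmpty_iff.mp hx
    rw [List.dropWhile_eq_nil_iff] at hnil
    have := hnil c (List.mem_reverse.mpr hct)
    rw [hcs] at this
    exact Bool.false_ne_true this
  simp only [PySem.Chars.rstrip, List.reverse_cons, List.dropWhile_append, htr,
    Bool.false_eq_true, if_false]
  simp

-- lstrip and rstrip commute
theorem pv_lstrip_rstrip (l : List Char) :
    PySem.Chars.lstrip (PySem.Chars.rstrip l) = PySem.Chars.rstrip (PySem.Chars.lstrip l) := by
  induction l with
  | nil => rfl
  | cons a t ih =>
    by_cases ha : PySem.Chars.isspace a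
    · by_cases hts : ∀ c ∈ t, PySem.Chars.isspace c = true
      · have h1 : PySem.Chars.lstrip (a :: t) = [] := by
          rw [show PySem.Chars.lstrip (a :: t) = (a :: t).dropWhile PySem.Chars.isspace from rfl,
            List.dropWhile_eq_nil_iff]
          intro c hc
          rcases List.mem_cons.mp hc with h | h
          · rw [h]; exact ha
          · exact hts c h
        have h2 : PySem.Chars.rstrip (a :: t) = [] := by
          simp only [PySem.Chars.rstrip, List.reverse_eq_nil_iff, List.dropWhile_eq_nil_iff]
          intro c hc
          rcases List.mem_cons.mp (List.mem_reverse.mp hc) with h | h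
          · rw [h]; exact ha
          · exact hts c h
        rw [h1, h2]
        rfl
      · push_neg at hts
        obtain ⟨c, hct, hcs⟩ := hts
        have hex : ∃ c ∈ t, PySem.Chars.isspace c = false := ⟨c, hct, by simpa using hcs⟩
        rw [pv_rstrip_cons_of_exists hex a]
        have hl2 : PySem.Chars.lstrip (a :: PySem.Chars.rstrip t) =
            PySem.Chars.lstrip (PySem.Chars.rstrip t) := by
          simp [PySem.Chars.lstrip, List.dropWhile_cons, ha]
        have hl3 : PySem.Chars.lstrip (a :: t) = PySem.Chars.lstrip t := by
          simp [PySem.Chars.lstrip, List.dropWhile_cons, ha]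
        rw [hl2, hl3, ih]
    · have ha' : PySem.Chars.isspace a = false := by simpa using ha
      have hr : PySem.Chars.rstrip (a :: t) = a :: PySem.Chars.rstrip t := by
        simpa using pv_rstrip_append ha' [] t
      have hl : PySem.Chars.lstrip (a :: t) = a :: t := by
        simp [PySem.Chars.lstrip, List.dropWhile_cons, ha']
      have hl2 : PySem.Chars.lstrip (a :: PySem.Chars.rstrip t) = a :: PySem.Chars.rstrip t := by
        simp [PySem.Chars.lstrip, List.dropWhile_cons, ha']
      rw [hr, hl, hl2, hr]

theorem pv_strip_idem (l : List Char) :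
    PySem.Chars.strip (PySem.Chars.strip l) = PySem.Chars.strip l := by
  simp only [PySem.Chars.strip]
  rw [pv_lstrip_rstrip, pv_lstrip_idem, pv_rstrip_idem]

theorem pv_strip_rstrip (l : List Char) :
    PySem.Chars.strip (PySem.Chars.rstrip l) = PySem.Chars.strip l := by
  simp only [PySem.Chars.strip]
  rw [pv_lstrip_rstrip, pv_rstrip_idem]

theorem pv_strip_lstrip (l : List Char) :
    PySem.Chars.strip (PySem.Chars.lstrip l) = PySem.Chars.strip l := by
  simp only [PySem.Chars.strip, pv_lstrip_idem]

theorem pv_clean_strip (l : List Char) : pvCleanTok (PySem.Chars.strip l) = pvCleanTok l := by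
  simp [pvCleanTok, pv_strip_idem]

theorem pv_clean_lstrip (l : List Char) : pvCleanTok (PySem.Chars.lstrip l) = pvCleanTok l := by
  simp [pvCleanTok, pv_strip_lstrip]

theorem pv_strip_nil_clean {l : List Char} (h : PySem.Chars.strip l = []) : pvCleanTok l = [] := by
  unfold pvCleanTok
  rw [h]
  rfl

theorem pv_mem_dropWhile {c : Char} {p : Char → Bool} {l : List Char}
    (h : c ∈ l.dropWhile p) : c ∈ l := (List.dropWhile_suffix p).mem h

theorem pv_mem_lstrip {c : Char} {l : List Char} (h : c ∈ PySem.Chars.lstrip l) : c ∈ l :=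
  pv_mem_dropWhile h

theorem pv_mem_rstrip {c : Char} {l : List Char} (h : c ∈ PySem.Chars.rstrip l) : c ∈ l := by
  simp only [PySem.Chars.rstrip, List.mem_reverse] at h
  exact List.mem_reverse.mp (pv_mem_dropWhile h)

theorem pv_mem_strip {c : Char} {l : List Char} (h : c ∈ PySem.Chars.strip l) : c ∈ l :=
  pv_mem_lstrip (pv_mem_rstrip h)

-- first-occurrence decomposition
theorem pv_first_occ {c : Char} {l : List Char} (h : c ∈ l) :
    ∃ u v, l = u ++ c :: v ∧ c ∉ u := by
  induction l with
  | nil => cases h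
  | cons a t ih =>
    by_cases hac : a = c
    · exact ⟨[], t, by simp [hac], by simp⟩
    · have hct : c ∈ t := by
        rcases List.mem_cons.mp h with h1 | h1
        · exact absurd h1.symm hac
        · exact h1
      obtain ⟨u, v, h1, h2⟩ := ih hct
      exact ⟨a :: u, v, by simp [h1], by simp [h2, Ne.symm hac]⟩

theorem pv_takeWhile_first {c : Char} {u : List Char} (h : c ∉ u) (v : List Char) :
    (u ++ c :: v).takeWhile (· ≠ c) = u := by
  induction u with
  | nil => simp [List.takeWhile_cons]
  | cons a t ih =>
    have ha : a ≠ c := fun hx => h (by simp [hx])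
    simp only [List.cons_append, List.takeWhile_cons, decide_eq_true_eq]
    rw [if_pos ha, ih (fun hx => h (by simp [hx]))]

theorem pv_dropWhile_first {c : Char} {u : List Char} (h : c ∉ u) (v : List Char) :
    (u ++ c :: v).dropWhile (· ≠ c) = c :: v := by
  induction u with
  | nil => simp [List.dropWhile_cons]
  | cons a t ih =>
    have ha : a ≠ c := fun hx => h (by simp [hx])
    simp only [List.cons_append, List.dropWhile_cons, decide_eq_true_eq]
    rw [if_pos ha, ih (fun hx => h (by simp [hx]))]

-- B's scan over paren-free text just extends the buffer
theorem pv_foldB_no_paren {cs : List Char} (h : '(' ∉ cs) (buf : List Char) (monos : List String) :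
    cs.foldl pvBStep (buf, false, monos) = (buf ++ cs, false, monos) := by
  induction cs generalizing buf with
  | nil => simp
  | cons a t ih =>
    have ha : a ≠ '(' := fun hx => h (by simp [hx])
    simp only [List.foldl_cons, pvBStep, ha, if_neg, ite_false, Bool.false_eq_true]
    simpa using ih (fun hx => h (by simp [hx])) (buf ++ [a])

-- B's scan inside an unmatched paren region skips everything
theorem pv_foldB_in_paren {cs : List Char} (h : ')' ∉ cs) (buf : List Char) (monos : List String) :
    cs.foldl pvBStep (buf, true, monos) = (buf, true, monos) := by
  induction cs with
  | nil => simp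
  | cons a t ih =>
    have ha : a ≠ ')' := fun hx => h (by simp [hx])
    simp only [List.foldl_cons, pvBStep, ha, ite_false, if_pos]
    exact ih (fun hx => h (by simp [hx]))

-- base case: no '(' anywhere — A cleans the whole remainder, B flushes its buffer
theorem pv_base {buf cs : List Char} (h : '(' ∉ buf ++ cs) (monos : List String) :
    pvALoop (PySem.Chars.strip (buf ++ cs)) monos =
      pvBFinish (cs.foldl pvBStep (buf, false, monos)) := by
  have hcs : '(' ∉ cs := fun hm => h (List.mem_append_right buf hm)
  rw [pv_foldB_no_paren hcs buf monos]
  have hsX : '(' ∉ PySem.Chars.strip (buf ++ cs) := fun hm => h (pv_mem_strip hm)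
  rw [pvALoop, dif_neg hsX]
  simp only [pvBFinish, Bool.false_eq_true, if_false]
  by_cases hs : PySem.Chars.strip (buf ++ cs) = []
  · rw [if_neg (by simpa using hs), if_neg (by simp [pv_strip_nil_clean hs])]
  · rw [if_pos (by simpa using hs), pv_clean_strip]

-- the main per-segment equivalence, by strong induction on the length of the unscanned suffix
theorem pv_main : ∀ n (cs : List Char), cs.length ≤ n → ∀ (buf : List Char) (monos : List String),
    '(' ∉ buf →
    pvALoop (PySem.Chars.strip (buf ++ cs)) monos =
      pvBFinish (cs.foldl pvBStep (buf, false, monos)) := by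
  intro n
  induction n with
  | zero =>
    intro cs hlen buf monos hbuf
    have hnil : cs = [] := List.eq_nil_of_length_eq_zero (Nat.le_zero.mp hlen)
    subst hnil
    exact pv_base (by simpa using hbuf) monos
  | succ n ihn =>
    intro cs hlen buf monos hbuf
    by_cases hc : '(' ∈ cs
    · obtain ⟨c1, c2, hcs, hc1⟩ := pv_first_occ hc
      subst hcs
      have hbc1 : '(' ∉ buf ++ c1 := by
        simp only [List.mem_append]
        rintro (h | h)
        · exact hbuf h
        · exact hc1 h
      have hstrip : PySem.Chars.strip (buf ++ (c1 ++ '(' :: c2)) =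
          PySem.Chars.lstrip (buf ++ c1) ++ '(' :: PySem.Chars.rstrip c2 := by
        rw [show buf ++ (c1 ++ '(' :: c2) = (buf ++ c1) ++ '(' :: c2 by simp]
        simp only [PySem.Chars.strip]
        rw [pv_lstrip_append (by decide) (buf ++ c1) c2,
          pv_rstrip_append (by decide) (PySem.Chars.lstrip (buf ++ c1)) c2]
      have hnotin : '(' ∉ PySem.Chars.lstrip (buf ++ c1) := fun hm => hbc1 (pv_mem_lstrip hm)
      rw [hstrip, pvALoop,
        dif_pos (List.mem_append_right (PySem.Chars.lstrip (buf ++ c1)) (List.mem_cons_self))]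
      simp only [pv_takeWhile_first hnotin, pv_dropWhile_first hnotin, List.tail_cons,
        pv_clean_lstrip]
      have hBsplit : (c1 ++ '(' :: c2).foldl pvBStep (buf, false, monos) =
          c2.foldl pvBStep ([], true,
            if pvCleanTok (buf ++ c1) ≠ [] then monos ++ [String.ofList (pvCleanTok (buf ++ c1))]
            else monos) := by
        rw [show c1 ++ '(' :: c2 = (c1 ++ ['(']) ++ c2 by simp, List.foldl_append,
          List.foldl_append, pv_foldB_no_paren hc1 buf monos]
        rfl
      rw [hBsplit]
      set monos' := if pvCleanTok (buf ++ c1) ≠ [] then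
        monos ++ [String.ofList (pvCleanTok (buf ++ c1))] else monos with hm'
      by_cases hr : ')' ∈ c2
      · obtain ⟨q, s, hc2, hq⟩ := pv_first_occ hr
        subst hc2
        rw [pv_rstrip_append (by decide) q s,
          if_pos (List.mem_append_right q (List.mem_cons_self))]
        have hqn : ')' ∉ q := hq
        simp only [pv_dropWhile_first hqn, List.tail_cons, pv_strip_rstrip]
        have hBskip : (q ++ ')' :: s).foldl pvBStep ([], true, monos') =
            s.foldl pvBStep ([], false, monos') := by
          rw [show q ++ ')' :: s = (q ++ [')']) ++ s by simp, List.foldl_append,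
            List.foldl_append, pv_foldB_in_paren hq [] monos']
          rfl
        rw [hBskip]
        have hlen' : s.length ≤ n := by
          have := hlen
          simp only [List.length_append, List.length_cons] at this
          omega
        simpa using ihn s hlen' [] monos' (by simp)
      · have hrr : ')' ∉ PySem.Chars.rstrip c2 := fun hm => hr (pv_mem_rstrip hm)
        rw [if_neg hrr, pv_foldB_in_paren hr [] monos']
        rfl
    · exact pv_base (by
        simp only [List.mem_append]
        rintro (h | h)
        · exact hbuf h
        · exact hc h) monos

-- per-segment form used at the top level
theorem pv_seg (seg : List Char) (monos : List String) :
    pvALoop (PySem.Chars.strip seg) monos = pvBFinish (seg.foldl pvBStep ([], false, monos)) := by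
  simpa using pv_main seg.length seg le_rfl [] monos (by simp)

theorem pv_folds (segs : List (List Char)) (monos : List String) :
    segs.foldl (fun monos seg => pvALoop (PySem.Chars.strip seg) monos) monos =
      segs.foldl (fun monos seg => pvBFinish (seg.foldl pvBStep ([], false, monos))) monos := by
  induction segs generalizing monos with
  | nil => rfl
  | cons s t ih => simp only [List.foldl_cons, pv_seg, ih]

-- ===== VERDICT (by name: the statement is the Claim_ definition above) =====
theorem extract_monos_from_chain_py_spec : Claim_equal_extract_monos_from_chain_py := by
  intro text _
  unfold Spec_extract_monos_from_chain_py extract_monos_from_chain_py extract_monos_from_chain_py_alt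
  exact pv_folds _ []
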